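-- pv_equiv track=rewrite | github.com/davidlu1001/file-combiner | file_combiner.py | _get_safe_fence
-- ===== SOURCE A (Python) =====
-- def _get_safe_fence(content: str, base_fence: str = "```") -> str:
--     """
--     Calculate a safe code fence that won't be broken by content.
--
--     If content contains backtick sequences, returns a longer fence.
--     For example, if content has ``` inside, returns ```` instead.
--
--     Args:
--         content: The content to be wrapped in code fence
--         base_fence: The base fence string (default: ```)
--
--     Returns:
--         A fence string that is safe to use with this content
--     """
--     fence = base_fence
--     backtick_char = "`"
--
--     # Find the longest sequence of backticks in content
--     max_backticks = 0
--     current_count = 0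
--
--     for char in content:
--         if char == backtick_char:
--             current_count += 1
--             max_backticks = max(max_backticks, current_count)
--         else:
--             current_count = 0
--
--     # If content has backtick sequences >= our fence, make fence longer
--     if max_backticks >= len(fence):
--         fence = backtick_char * (max_backticks + 1)
--
--     return fence
-- ===== SOURCE B (Python) =====
-- def _get_safe_fence(content: str, base_fence: str = "```") -> str:
--     """Safe fence by candidate testing: grow the fence while an equally long
--     backtick string still occurs as a substring of the content."""
--     fence = base_fence
--     while "`" * len(fence) in content:
--         fence = "`" * (len(fence) + 1)
--     return fence
-- ===== Notes on version B (the rewrite author's own statement) =====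
-- stated objective: simpler
-- what changed: Instead of computing the longest backtick run with a per-character counter scan, B never measures runs: it tests candidate fences by substring membership, growing the fence one backtick at a time while a backtick string of the fence's length still occurs in the content.
import Mathlib
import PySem

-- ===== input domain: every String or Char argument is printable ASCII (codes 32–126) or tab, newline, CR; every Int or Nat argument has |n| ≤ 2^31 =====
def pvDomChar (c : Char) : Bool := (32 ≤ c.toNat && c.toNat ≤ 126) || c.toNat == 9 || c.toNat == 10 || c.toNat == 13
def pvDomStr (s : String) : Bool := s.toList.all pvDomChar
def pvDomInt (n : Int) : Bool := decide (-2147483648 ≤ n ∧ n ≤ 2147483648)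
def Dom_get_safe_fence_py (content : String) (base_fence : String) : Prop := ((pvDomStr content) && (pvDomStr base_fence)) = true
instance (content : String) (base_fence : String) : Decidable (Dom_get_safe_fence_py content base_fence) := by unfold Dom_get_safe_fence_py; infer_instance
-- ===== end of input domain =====

-- B replaces A's longest-backtick-run counting scan by candidate testing: grow the
-- fence while an equally long backtick string is still a substring of the content;
-- objective: simpler (no run measurement at all).

-- ===== PORT A =====
-- A's loop: state (max_backticks, current_count) updated per character.
def pvLoopA : List Char → Nat → Nat → Nat
  | [], maxb, _ => maxb
  | c :: cs, maxb, cur =>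
      if c = '`' then pvLoopA cs (max maxb (cur + 1)) (cur + 1)
      else pvLoopA cs maxb 0

def get_safe_fence_py (content : String) (base_fence : String) : String :=
  let fence := base_fence
  let max_backticks := pvLoopA content.toList 0 0
  if (PySem.Str.len fence) ≤ (max_backticks : Int) then
    String.ofList (List.replicate (max_backticks + 1) '`')
  else fence

-- ===== PORT B =====
-- termination fact the loop cites: a backtick string that occurs in cl is no longer than cl
theorem pvInfix_len_le {k : Nat} {cl : List Char}
    (h : PySem.Chars.isIn (List.replicate k '`') cl = true) : k ≤ cl.length := by
  have := (PySem.Chars.isIn_iff_infix _ _).mp h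
  simpa using this.length_le

-- B's loop: while '`' * len(fence) in content: fence = '`' * (len(fence) + 1)
def pvLoopB (cl : List Char) (fence : List Char) : List Char :=
  if h : PySem.Chars.isIn (List.replicate fence.length '`') cl = true then
    pvLoopB cl (List.replicate (fence.length + 1) '`')
  else fence
  termination_by cl.length + 1 - fence.length
  decreasing_by
    have := pvInfix_len_le h
    simp only [List.length_replicate]
    omega

def get_safe_fence_py_alt (content : String) (base_fence : String) : String :=
  String.ofList (pvLoopB content.toList base_fence.toList)

-- ===== PRECONDITION & SPEC =====
def Spec_get_safe_fence_py (content : String) (base_fence : String) (out : String) : Prop := out = get_safe_fence_py_alt content base_fence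
instance (content : String) (base_fence : String) (out : String) : Decidable (Spec_get_safe_fence_py content base_fence out) := by unfold Spec_get_safe_fence_py; infer_instance

-- ===== CLAIM (what is proved, stated in full; the proofs are below) =====
def Claim_equal_get_safe_fence_py : Prop := ∀ (content : String) (base_fence : String), Dom_get_safe_fence_py content base_fence → Spec_get_safe_fence_py content base_fence (get_safe_fence_py content base_fence)

-- ===== LEMMAS AND PROOFS =====

-- proof-only helper: the pending-run view of A's remaining maximum
def pvG : List Char → Nat → Nat
  | [], cur => cur
  | c :: cs, cur =>
      if c = '`' then pvG cs (cur + 1)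
      else max cur (pvG cs 0)

theorem pvG_le (cs : List Char) (cur : Nat) : cur ≤ pvG cs cur := by
  induction cs generalizing cur with
  | nil => simp [pvG]
  | cons c cs ih =>
    simp only [pvG]
    split
    · exact le_trans (Nat.le_succ cur) (ih (cur + 1))
    · exact Nat.le_max_left _ _

theorem pvG_mono (cs : List Char) {cur cur' : Nat} (h : cur ≤ cur') :
    pvG cs cur ≤ pvG cs cur' := by
  induction cs generalizing cur cur' with
  | nil => simpa [pvG]
  | cons c cs ih =>
    simp only [pvG]
    split
    · exact ih (by omega)
    · omega

theorem pvLoopA_eq_pvG (cs : List Char) (maxb cur : Nat) (h : cur ≤ maxb) :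
    pvLoopA cs maxb cur = max maxb (pvG cs cur) := by
  induction cs generalizing maxb cur with
  | nil => simp [pvLoopA, pvG]; omega
  | cons c cs ih =>
    simp only [pvLoopA, pvG]
    split
    · rw [ih (max maxb (cur + 1)) (cur + 1) (Nat.le_max_right _ _)]
      have := pvG_le cs (cur + 1)
      omega
    · rw [ih maxb 0 (Nat.zero_le _)]
      have := pvG_le cs 0
      omega

theorem pvG_replicate_append (k : Nat) (u : List Char) (cur : Nat) :
    pvG (List.replicate k '`' ++ u) cur = pvG u (cur + k) := by
  induction k generalizing cur with
  | zero => simp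
  | succ k ih =>
    simp only [List.replicate_succ, List.cons_append, pvG]
    simp only [if_true]
    rw [ih]
    ring_nf

-- forward: any backtick string occurring in cs is at most pvG cs 0 long
theorem pvInfix_le_pvG {k : Nat} {cs : List Char}
    (h : List.replicate k '`' <:+: cs) : k ≤ pvG cs 0 := by
  obtain ⟨s, u, hsu⟩ := h
  subst hsu
  induction s with
  | nil =>
    simp only [List.nil_append]
    rw [pvG_replicate_append]
    simpa using pvG_le u k
  | cons a s ih =>
    simp only [List.cons_append, pvG]
    split
    · exact le_trans ih (pvG_mono _ (by omega))
    · omega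

-- backward: a backtick string of length pvG cs cur occurs in replicate cur '`' ++ cs
theorem pvG_infix (cs : List Char) (cur : Nat) :
    List.replicate (pvG cs cur) '`' <:+: (List.replicate cur '`' ++ cs) := by
  induction cs generalizing cur with
  | nil => simp [pvG]
  | cons c cs ih =>
    by_cases hc : c = '`'
    · subst hc
      simp only [pvG, if_true]
      have h1 := ih (cur + 1)
      have : List.replicate (cur + 1) '`' ++ cs = List.replicate cur '`' ++ '`' :: cs := by
        rw [List.replicate_succ']; simp
      rwa [this] at h1
    · simp only [pvG, if_neg hc]
      rcases max_choice cur (pvG cs 0) with h | h <;> rw [h]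
      · exact ⟨[], c :: cs, rfl⟩
      · have h0 := ih 0
        simp only [List.replicate_zero, List.nil_append] at h0
        exact h0.trans ⟨List.replicate cur '`' ++ [c], [], by simp⟩

theorem pvLe_infix {k : Nat} {cs : List Char} (h : k ≤ pvG cs 0) :
    List.replicate k '`' <:+: cs := by
  have h1 : List.replicate k '`' <+: List.replicate (pvG cs 0) '`' :=
    (List.prefix_replicate_iff).mpr ⟨by simpa using h, by simp⟩
  have h2 := pvG_infix cs 0
  simp only [List.replicate_zero, List.nil_append] at h2
  exact h1.isInfix.trans h2

theorem pvInfix_iff (k : Nat) (cs : List Char) :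
    PySem.Chars.isIn (List.replicate k '`') cs = true ↔ k ≤ pvG cs 0 := by
  rw [PySem.Chars.isIn_iff_infix]
  exact ⟨pvInfix_le_pvG, pvLe_infix⟩

-- once the fence is pure backticks of length ≤ M + 1, the loop lands on M + 1
theorem pvLoopB_backticks (cl : List Char) (k : Nat) (hk : k ≤ pvG cl 0 + 1) :
    pvLoopB cl (List.replicate k '`') = List.replicate (pvG cl 0 + 1) '`' := by
  generalize hm : pvG cl 0 + 1 - k = m
  induction m generalizing k with
  | zero =>
    have hk' : k = pvG cl 0 + 1 := by omega
    rw [pvLoopB]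
    have : ¬ PySem.Chars.isIn (List.replicate (List.replicate k '`').length '`') cl = true := by
      rw [List.length_replicate, pvInfix_iff]; omega
    rw [dif_neg this, hk']
  | succ m ih =>
    rw [pvLoopB]
    have : PySem.Chars.isIn (List.replicate (List.replicate k '`').length '`') cl = true := by
      rw [List.length_replicate, pvInfix_iff]; omega
    rw [dif_pos this]
    simp only [List.length_replicate]
    exact ih (k + 1) (by omega) (by omega)

theorem pvLoopB_eq (cl : List Char) (fence : List Char) :
    pvLoopB cl fence =
      if fence.length ≤ pvG cl 0 then List.replicate (pvG cl 0 + 1) '`' else fence := by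
  rw [pvLoopB]
  by_cases h : fence.length ≤ pvG cl 0
  · rw [if_pos h]
    have hin : PySem.Chars.isIn (List.replicate fence.length '`') cl = true := by
      rw [pvInfix_iff]; exact h
    rw [dif_pos hin]
    exact pvLoopB_backticks cl (fence.length + 1) (by omega)
  · rw [if_neg h]
    have hin : ¬ PySem.Chars.isIn (List.replicate fence.length '`') cl = true := by
      rw [pvInfix_iff]; omega
    rw [dif_neg hin]

-- ===== VERDICT (by name: the statement is the Claim_ definition above) =====
theorem get_safe_fence_py_spec : Claim_equal_get_safe_fence_py := by
  intro content base_fence _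
  unfold Spec_get_safe_fence_py get_safe_fence_py get_safe_fence_py_alt
  rw [pvLoopB_eq, pvLoopA_eq_pvG _ 0 0 (le_refl 0)]
  simp only [Nat.zero_max, PySem.Str.len_eq]
  by_cases h : base_fence.toList.length ≤ pvG content.toList 0
  · rw [if_pos h, if_pos (by exact_mod_cast h)]
  · rw [if_neg h, if_neg (by exact_mod_cast h), String.ofList_toList]
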